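-- pv_equiv track=rewrite | github.com/GeorgeLuImmortal/RDL-Rationales-centric-Double-robustness-Learning | IMDb_step1_generate_missing_rationales_examples.py | detect_rationale_spans
-- ===== SOURCE A (Python) =====
-- from itertools import groupby
-- from operator import itemgetter
--
-- def detect_rationale_spans(non_rationale_pos,text_length,max_length=1):
--
--     rationale_spans = []
--
--     rationale_pos = list(set([i for i in range(text_length)])-set(non_rationale_pos))
--     rationale_pos.sort()
--
--     for k, g in groupby(enumerate(rationale_pos),lambda ix : ix[0] - ix[1]):
--         span = list(map(itemgetter(1), g))
--         if len(span) <= max_length: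
--             rationale_spans.append(span)
--
--
--
--     return rationale_spans, rationale_pos
-- ===== SOURCE B (Python) =====
-- def detect_rationale_spans(non_rationale_pos, text_length, max_length=1):
--     blocked = set(non_rationale_pos)
--     rationale_spans = []
--     rationale_pos = []
--     run = []
--     for i in range(text_length):
--         if i in blocked:
--             if run and len(run) <= max_length:
--                 rationale_spans.append(run)
--             run = []
--         else:
--             rationale_pos.append(i)
--             run.append(i)
--     if run and len(run) <= max_length:
--         rationale_spans.append(run)
--     return rationale_spans, rationale_pos
-- ===== Notes on version B (the rewrite author's own statement) =====
-- stated objective: alternative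
-- what changed: Replaced A's set-difference + sort + groupby(enumerate) pipeline by a single linear pass over range(text_length) with a membership set and a current-run accumulator that is flushed at each blocked position.
import Mathlib
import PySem

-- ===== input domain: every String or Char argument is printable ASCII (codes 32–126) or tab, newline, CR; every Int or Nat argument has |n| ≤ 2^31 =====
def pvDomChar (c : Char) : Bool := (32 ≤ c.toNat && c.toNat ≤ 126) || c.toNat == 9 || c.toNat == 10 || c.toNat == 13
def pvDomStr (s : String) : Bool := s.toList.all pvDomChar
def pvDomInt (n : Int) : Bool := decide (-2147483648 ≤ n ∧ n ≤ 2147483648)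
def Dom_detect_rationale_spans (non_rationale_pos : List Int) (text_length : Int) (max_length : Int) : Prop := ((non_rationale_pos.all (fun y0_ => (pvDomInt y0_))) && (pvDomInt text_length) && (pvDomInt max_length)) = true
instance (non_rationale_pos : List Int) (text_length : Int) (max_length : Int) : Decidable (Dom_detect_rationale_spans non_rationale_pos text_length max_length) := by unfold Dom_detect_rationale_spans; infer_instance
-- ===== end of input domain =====

-- B replaces A's set-difference + sort + groupby(enumerate) pipeline by one linear pass
-- over range(text_length) with a membership set and a current-run accumulator (objective: alternative).


-- ===== PORT A =====
-- itertools.groupby(enumerate(xs), key = lambda ix: ix[0] - ix[1]): take one maximal block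
-- of adjacent pairs sharing the key k, return (block, rest).
def pvTakeGroup (k : Int) : List (Int × Int) → List (Int × Int) × List (Int × Int)
  | [] => ([], [])
  | p :: ps =>
    if p.1 - p.2 = k then
      let r := pvTakeGroup k ps
      (p :: r.1, r.2)
    else ([], p :: ps)

-- needed by pvGroupby's termination proof
theorem pvTakeGroup_rest_length_le (k : Int) (ps : List (Int × Int)) :
    (pvTakeGroup k ps).2.length ≤ ps.length := by
  induction ps with
  | nil => simp [pvTakeGroup]
  | cons p ps ih =>
    simp only [pvTakeGroup]
    split
    · simpa using Nat.le_succ_of_le ih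
    · simp

-- itertools.groupby over the enumerated list with key ix[0] - ix[1]
def pvGroupby : List (Int × Int) → List (List (Int × Int))
  | [] => []
  | p :: ps =>
    let r := pvTakeGroup (p.1 - p.2) ps
    (p :: r.1) :: pvGroupby r.2
termination_by l => l.length
decreasing_by
  simpa using Nat.lt_succ_of_le (pvTakeGroup_rest_length_le (p.1 - p.2) ps)

def detect_rationale_spans (non_rationale_pos : List Int) (text_length : Int) (max_length : Int) : List (List Int) × List Int :=
  -- rationale_pos = sorted(set(range(text_length)) - set(non_rationale_pos))
  let rationale_pos :=
    PySem.List.sorted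
      (PySem.Set.diff (PySem.Set.ofList (PySem.List.pyRange 0 text_length 1))
        (PySem.Set.ofList non_rationale_pos)) (fun x => x)
  -- for k, g in groupby(enumerate(rationale_pos), key=ix[0]-ix[1]): span = map(itemgetter(1), g); filter by len
  let rationale_spans :=
    (pvGroupby (PySem.List.enumerate rationale_pos 0)).foldl
      (fun acc g =>
        let span := g.map Prod.snd
        if (span.length : Int) ≤ max_length then acc ++ [span] else acc) []
  (rationale_spans, rationale_pos)

-- ===== PORT B =====
def detect_rationale_spans_alt (non_rationale_pos : List Int) (text_length : Int) (max_length : Int) : List (List Int) × List Int :=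
  let blocked : PySem.Set Int := PySem.Set.ofList non_rationale_pos
  let st :=
    (PySem.List.pyRange 0 text_length 1).foldl
      (fun (st : List (List Int) × List Int × List Int) i =>
        if blocked.contains i then
          (if st.2.2 ≠ [] ∧ (st.2.2.length : Int) ≤ max_length then st.1 ++ [st.2.2] else st.1,
           st.2.1, [])
        else
          (st.1, st.2.1 ++ [i], st.2.2 ++ [i]))
      ([], [], [])
  (if st.2.2 ≠ [] ∧ (st.2.2.length : Int) ≤ max_length then st.1 ++ [st.2.2] else st.1,
   st.2.1)

-- ===== PRECONDITION & SPEC =====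
def Spec_detect_rationale_spans (non_rationale_pos : List Int) (text_length : Int) (max_length : Int) (out : List (List Int) × List Int) : Prop := out = detect_rationale_spans_alt non_rationale_pos text_length max_length
instance (non_rationale_pos : List Int) (text_length : Int) (max_length : Int) (out : List (List Int) × List Int) : Decidable (Spec_detect_rationale_spans non_rationale_pos text_length max_length out) := by unfold Spec_detect_rationale_spans; infer_instance

-- ===== CLAIM (what is proved, stated in full; the proofs are below) =====
def Claim_equal_detect_rationale_spans : Prop := ∀ (non_rationale_pos : List Int) (text_length : Int) (max_length : Int), Dom_detect_rationale_spans non_rationale_pos text_length max_length → Spec_detect_rationale_spans non_rationale_pos text_length max_length (detect_rationale_spans non_rationale_pos text_length max_length)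

-- ===== LEMMAS AND PROOFS =====

-- maximal blocks of consecutive integers (value-level mirror of groupby(enumerate, i-v))
def pvRunsTake (v : Int) : List Int → List Int × List Int
  | [] => ([], [])
  | x :: xs =>
    if x = v + 1 then
      let r := pvRunsTake x xs
      (x :: r.1, r.2)
    else ([], x :: xs)

theorem pvRunsTake_rest_length_le (v : Int) (xs : List Int) :
    (pvRunsTake v xs).2.length ≤ xs.length := by
  induction xs generalizing v with
  | nil => simp [pvRunsTake]
  | cons x xs ih =>
    simp only [pvRunsTake]
    split
    · simpa using Nat.le_succ_of_le (ih x)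
    · simp

def pvRuns : List Int → List (List Int)
  | [] => []
  | x :: xs =>
    let r := pvRunsTake x xs
    (x :: r.1) :: pvRuns r.2
termination_by l => l.length
decreasing_by simpa using Nat.lt_succ_of_le (pvRunsTake_rest_length_le x xs)

theorem pvRunsTake_append (v : Int) (xs : List Int) :
    (pvRunsTake v xs).1 ++ (pvRunsTake v xs).2 = xs := by
  induction xs generalizing v with
  | nil => simp [pvRunsTake]
  | cons x xs ih =>
    simp only [pvRunsTake]
    split
    · simpa using ih x
    · simp

theorem pvRuns_eq_nil_iff (xs : List Int) : pvRuns xs = [] ↔ xs = [] := by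
  cases xs <;> simp [pvRuns]

theorem pvRuns_ne_nil_mem (xs : List Int) : [] ∉ pvRuns xs := by
  match xs with
  | [] => simp [pvRuns]
  | x :: l =>
    rw [pvRuns]
    simp only [List.mem_cons, not_or]
    exact ⟨by simp, pvRuns_ne_nil_mem (pvRunsTake x l).2⟩
termination_by xs.length
decreasing_by simpa using Nat.lt_succ_of_le (pvRunsTake_rest_length_le x l)

-- groupby(enumerate(xs, s+1), key=i-v) takes exactly the first consecutive run
theorem pvTakeGroup_enumerate (xs : List Int) (v s : Int) :
    pvTakeGroup (s - v) (PySem.List.enumerate xs (s + 1)) =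
      (PySem.List.enumerate (pvRunsTake v xs).1 (s + 1),
       PySem.List.enumerate (pvRunsTake v xs).2 (s + 1 + (pvRunsTake v xs).1.length)) := by
  induction xs generalizing v s with
  | nil => simp [pvRunsTake, pvTakeGroup, PySem.List.enumerate_nil]
  | cons x xs ih =>
    rw [PySem.List.enumerate_cons]
    by_cases hx : x = v + 1
    · subst hx
      have hih := ih (v + 1) (s + 1)
      rw [show s + 1 - (v + 1) = s - v from by omega] at hih
      simp only [pvTakeGroup, pvRunsTake, show s + 1 - (v + 1) = s - v from by omega,
        ite_true, hih, PySem.List.enumerate_cons, Prod.mk.injEq, true_and]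
      congr 1
      simp only [List.length_cons]
      push_cast
      ring
    · simp only [pvTakeGroup, pvRunsTake, if_neg hx,
        if_neg (show ¬ (s + 1 - x = s - v) from by omega)]
      simp [PySem.List.enumerate_nil, PySem.List.enumerate_cons]

theorem pvGroupby_enumerate (xs : List Int) (s : Int) :
    (pvGroupby (PySem.List.enumerate xs s)).map (List.map Prod.snd) = pvRuns xs := by
  match xs with
  | [] => simp [PySem.List.enumerate_nil, pvGroupby, pvRuns]
  | x :: l =>
    rw [PySem.List.enumerate_cons, pvGroupby, pvRuns]
    have htg := pvTakeGroup_enumerate l x s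
    simp only at htg ⊢
    rw [htg]
    simp only [List.map, PySem.List.map_snd_enumerate]
    rw [pvGroupby_enumerate (pvRunsTake x l).2 (s + 1 + (pvRunsTake x l).1.length)]
termination_by xs.length
decreasing_by simpa using Nat.lt_succ_of_le (pvRunsTake_rest_length_le x l)

theorem pvRunsTake_snoc (v0 : Int) (l : List Int) (v : Int) :
    pvRunsTake v0 (l ++ [v]) =
      if (pvRunsTake v0 l).2 = [] then
        (if v = l.getLastD v0 + 1 then ((pvRunsTake v0 l).1 ++ [v], ([] : List Int))
         else ((pvRunsTake v0 l).1, [v]))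
      else ((pvRunsTake v0 l).1, (pvRunsTake v0 l).2 ++ [v]) := by
  induction l generalizing v0 with
  | nil => by_cases hv : v = v0 + 1 <;> simp [pvRunsTake, hv]
  | cons x l ih =>
    by_cases hx : x = v0 + 1
    · simp only [List.cons_append, pvRunsTake, if_pos hx, List.getLastD_cons, ih x]
      split_ifs <;> simp_all
    · simp [pvRunsTake, if_neg hx]

theorem pvRuns_snoc_new (xs : List Int) (v : Int) (h : ∀ x ∈ xs, x + 1 ≠ v) :
    pvRuns (xs ++ [v]) = pvRuns xs ++ [[v]] := by
  match xs with
  | [] => simp [pvRuns, pvRunsTake]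
  | x :: l =>
    rw [List.cons_append, pvRuns, pvRuns]
    simp only [pvRunsTake_snoc]
    by_cases h2 : (pvRunsTake x l).2 = []
    · have hmem : l.getLastD x ∈ x :: l := by
        rw [List.getLastD_eq_getLast?]
        cases hgl : l.getLast? with
        | none => simp
        | some w => exact List.mem_cons_of_mem x (List.mem_of_getLast? hgl)
      have hlast : ¬ (v = l.getLastD x + 1) := fun hv => h _ hmem (by omega)
      simp only [h2, if_pos rfl, if_neg hlast, ite_true]
      simp [pvRuns, pvRunsTake, h2]
    · simp only [if_neg h2]
      have hrec := pvRuns_snoc_new (pvRunsTake x l).2 v (by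
        intro y hy hyv
        exact h y (by
          have := pvRunsTake_append x l
          exact List.mem_cons_of_mem x (by rw [← this]; exact List.mem_append_right _ hy)) hyv)
      simp only [hrec]
      simp [pvRuns]
termination_by xs.length
decreasing_by simpa using Nat.lt_succ_of_le (pvRunsTake_rest_length_le x l)

theorem pvRuns_snoc_extend (xs : List Int) (v : Int) (h : xs.getLast? = some (v - 1)) :
    pvRuns (xs ++ [v]) =
      (pvRuns xs).dropLast ++ [((pvRuns xs).getLastD []) ++ [v]] := by
  match xs with
  | [] => simp at h
  | x :: l =>
    rw [List.cons_append, pvRuns, pvRuns]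
    simp only [pvRunsTake_snoc]
    by_cases h2 : (pvRunsTake x l).2 = []
    · have ht1 : (pvRunsTake x l).1 = l := by
        have := pvRunsTake_append x l
        rw [h2] at this
        simpa using this
      have hv : v = l.getLastD x + 1 := by
        rw [List.getLast?_cons] at h
        rw [List.getLastD_eq_getLast?]
        cases hgl : l.getLast? with
        | none => simp [hgl] at h ⊢; omega
        | some w => simp [hgl] at h ⊢; omega
      simp only [h2, if_pos rfl, if_pos hv, ite_true]
      simp [pvRuns, h2, List.cons_append]
    · simp only [if_neg h2]
      have htail : (pvRunsTake x l).2.getLast? = some (v - 1) := by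
        have hsplit : (x :: l).getLast? = (pvRunsTake x l).2.getLast? := by
          conv_lhs => rw [show x :: l = (x :: (pvRunsTake x l).1) ++ (pvRunsTake x l).2 from by
            rw [List.cons_append, pvRunsTake_append]]
          exact List.getLast?_append_of_ne_nil _ h2
        rw [hsplit] at h
        exact h
      have hrec := pvRuns_snoc_extend (pvRunsTake x l).2 v htail
      simp only [hrec]
      have hG : pvRuns (pvRunsTake x l).2 ≠ [] := by
        rw [Ne, pvRuns_eq_nil_iff]; exact h2
      cases hGe : pvRuns (pvRunsTake x l).2 with
      | nil => exact absurd hGe hG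
      | cons g G' =>
        simp [pvRuns, hGe, List.dropLast_cons_of_ne_nil, List.getLastD_cons]
termination_by xs.length
decreasing_by simpa using Nat.lt_succ_of_le (pvRunsTake_rest_length_le x l)

theorem pvRuns_getLastD_getLast? (xs : List Int) (h : xs ≠ []) :
    ((pvRuns xs).getLastD []).getLast? = xs.getLast? := by
  match xs with
  | [] => exact absurd rfl h
  | x :: l =>
    rw [pvRuns]
    by_cases h2 : (pvRunsTake x l).2 = []
    · have ht1 : (pvRunsTake x l).1 = l := by
        have := pvRunsTake_append x l
        rw [h2] at this
        simpa using this
      simp [pvRuns, h2, ht1]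
    · have hrec := pvRuns_getLastD_getLast? (pvRunsTake x l).2 h2
      have hG : pvRuns (pvRunsTake x l).2 ≠ [] := by
        rw [Ne, pvRuns_eq_nil_iff]; exact h2
      cases hGe : pvRuns (pvRunsTake x l).2 with
      | nil => exact absurd hGe hG
      | cons g G' =>
        rw [hGe] at hrec
        have hsplit : (x :: l).getLast? = (pvRunsTake x l).2.getLast? := by
          conv_lhs => rw [show x :: l = (x :: (pvRunsTake x l).1) ++ (pvRunsTake x l).2 from by
            rw [List.cons_append, pvRunsTake_append]]
          exact List.getLast?_append_of_ne_nil _ h2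
        rw [hsplit]
        simpa [List.getLastD_cons, hGe] using hrec
termination_by xs.length
decreasing_by simpa using Nat.lt_succ_of_le (pvRunsTake_rest_length_le x l)

-- the sorted complement list
def pvL (non : List Int) (t : Int) : List Int :=
  (PySem.List.pyRange 0 t 1).filter (fun i => !(PySem.Set.ofList non).contains i)

theorem pvA_eq (non : List Int) (t m : Int) :
    detect_rationale_spans non t m =
      ((pvRuns (pvL non t)).filter (fun g => decide ((g.length : Int) ≤ m)), pvL non t) := by
  have hpos : PySem.List.sorted
      (PySem.Set.diff (PySem.Set.ofList (PySem.List.pyRange 0 t 1))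
        (PySem.Set.ofList non)) (fun x => x) = pvL non t := by
    have hdiff : PySem.Set.diff (PySem.Set.ofList (PySem.List.pyRange 0 t 1))
        (PySem.Set.ofList non) = pvL non t := by
      show List.filter _ (PySem.Set.ofList (PySem.List.pyRange 0 t 1)) = _
      rw [PySem.Set.ofList_eq_self_of_nodup _ (PySem.List.nodup_pyRange_one 0 t)]
      rfl
    rw [hdiff]
    exact PySem.List.sorted_id_eq_of_perm_of_pairwise _ _ (List.Perm.refl _)
      (((PySem.List.pairwise_lt_pyRange_one 0 t).filter _).imp le_of_lt)
  unfold detect_rationale_spans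
  simp only [hpos]
  refine Prod.ext ?_ rfl
  show List.foldl _ [] (pvGroupby (PySem.List.enumerate (pvL non t) 0)) = _
  have hfun : (fun (acc : List (List Int)) (g : List (Int × Int)) =>
        let span := g.map Prod.snd
        if (span.length : Int) ≤ m then acc ++ [span] else acc)
      = (fun acc g =>
        if (fun (g : List (Int × Int)) => decide (((g.map Prod.snd).length : Int) ≤ m)) g = true
        then acc ++ [(fun (g : List (Int × Int)) => g.map Prod.snd) g] else acc) := by
    funext acc g
    simp
  rw [hfun, PySem.List.foldl_append_if, List.nil_append,
    show (fun (g : List (Int × Int)) => decide (((g.map Prod.snd).length : Int) ≤ m))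
      = (fun (s : List Int) => decide ((s.length : Int) ≤ m)) ∘ (fun g => g.map Prod.snd) from rfl,
    ← List.filter_map, pvGroupby_enumerate]

theorem pvL_succ (non : List Int) (n : Nat) :
    pvL non ((n : Int) + 1) =
      pvL non n ++ (if (PySem.Set.ofList non).contains (n : Int) = true
        then [] else [(n : Int)]) := by
  unfold pvL
  rw [PySem.List.pyRange_one_succ_right (by exact_mod_cast Nat.zero_le n), List.filter_append]
  congr 1
  by_cases hc : (n : Int) ∈ non <;> simp [hc]

-- B's loop step
def pvStep (non : List Int) (m : Int) (st : List (List Int) × List Int × List Int) (i : Int) :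
    List (List Int) × List Int × List Int :=
  if (PySem.Set.ofList non).contains i then
    (if st.2.2 ≠ [] ∧ (st.2.2.length : Int) ≤ m then st.1 ++ [st.2.2] else st.1, st.2.1, [])
  else (st.1, st.2.1 ++ [i], st.2.2 ++ [i])

theorem pvInv (non : List Int) (m : Int) (n : Nat) :
    (((PySem.List.pyRange 0 (n : Int) 1).foldl (pvStep non m) ([], [], [])).2.1 = pvL non n) ∧
    ((((PySem.List.pyRange 0 (n : Int) 1).foldl (pvStep non m) ([], [], [])).2.2 = [] ∧
      ((PySem.List.pyRange 0 (n : Int) 1).foldl (pvStep non m) ([], [], [])).1 =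
        (pvRuns (pvL non n)).filter (fun g => decide ((g.length : Int) ≤ m)) ∧
      (n = 0 ∨ (PySem.Set.ofList non).contains ((n : Int) - 1) = true)) ∨
     (((PySem.List.pyRange 0 (n : Int) 1).foldl (pvStep non m) ([], [], [])).2.2 =
        (pvRuns (pvL non n)).getLastD [] ∧
      ((PySem.List.pyRange 0 (n : Int) 1).foldl (pvStep non m) ([], [], [])).1 =
        ((pvRuns (pvL non n)).dropLast).filter (fun g => decide ((g.length : Int) ≤ m)) ∧
      (PySem.Set.ofList non).contains ((n : Int) - 1) = false ∧
      (pvL non n).getLast? = some ((n : Int) - 1))) := by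
  induction n with
  | zero =>
    constructor
    · simp [PySem.List.pyRange_one_eq_nil (le_refl (0 : Int)), pvL]
    · left
      refine ⟨?_, ?_, Or.inl rfl⟩ <;>
        simp [PySem.List.pyRange_one_eq_nil (le_refl (0 : Int)), pvL, pvRuns]
  | succ n ih =>
    have hN1 : ((n + 1 : Nat) : Int) = (n : Int) + 1 := by push_cast; ring
    have hstep : (PySem.List.pyRange 0 ((n + 1 : Nat) : Int) 1).foldl (pvStep non m) ([], [], [])
        = pvStep non m ((PySem.List.pyRange 0 (n : Int) 1).foldl (pvStep non m) ([], [], []))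
            (n : Int) := by
      rw [hN1, PySem.List.pyRange_one_succ_right (by exact_mod_cast Nat.zero_le n),
        List.foldl_append]
      rfl
    obtain ⟨ihP, ihD⟩ := ih
    rw [hstep]
    set st := (PySem.List.pyRange 0 (n : Int) 1).foldl (pvStep non m) ([], [], []) with hst
    by_cases hc : (PySem.Set.ofList non).contains (n : Int) = true
    · -- position n is blocked: flush
      have hL : pvL non ((n + 1 : Nat) : Int) = pvL non n := by
        rw [hN1, pvL_succ, hc]
        simp
      rw [pvStep, if_pos hc]
      refine ⟨by show st.2.1 = pvL non ((n + 1 : Nat) : Int); rw [hL]; exact ihP, ?_⟩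
      left
      refine ⟨rfl, ?_, Or.inr (by rw [show ((n + 1 : Nat) : Int) - 1 = (n : Int) from by push_cast; ring]; exact hc)⟩
      rw [hL]
      rcases ihD with ⟨hR, hS, _⟩ | ⟨hR, hS, _, hlast⟩
      · rw [if_neg (by simp [hR])]
        exact hS
      · have hLne : pvL non n ≠ [] := by
          intro h0
          rw [h0] at hlast
          simp at hlast
        have hrne : pvRuns (pvL non n) ≠ [] := by
          rw [Ne, pvRuns_eq_nil_iff]; exact hLne
        rcases List.eq_nil_or_concat (pvRuns (pvL non n)) with h0 | ⟨G, g, hG⟩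
        · exact absurd h0 hrne
        rw [List.concat_eq_append] at hG
        have hRg : st.2.2 = g := by rw [hR, hG, List.getLastD_concat]
        have hgne : g ≠ [] := by
          intro h0
          apply pvRuns_ne_nil_mem (pvL non n)
          rw [hG, h0]
          exact List.mem_append_right _ (by simp)
        rw [hG, List.filter_append, hS, hG, List.dropLast_concat]
        by_cases hlen : ((g.length : Int) ≤ m)
        · rw [if_pos (by rw [hRg]; exact ⟨hgne, hlen⟩), hRg]
          simp [hlen]
        · rw [if_neg (by rw [hRg]; exact fun hh => hlen hh.2)]
          simp [hlen]
    · -- position n is rationale: extend the current run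
      have hL : pvL non ((n + 1 : Nat) : Int) = pvL non n ++ [(n : Int)] := by
        rw [hN1, pvL_succ, if_neg hc]
      have hcf : (PySem.Set.ofList non).contains (n : Int) = false := by
        simpa using hc
      rw [pvStep, if_neg hc]
      refine ⟨by show st.2.1 ++ [(n : Int)] = pvL non ((n + 1 : Nat) : Int); rw [hL, ihP], ?_⟩
      right
      rcases ihD with ⟨hR, hS, hor⟩ | ⟨hR, hS, _, hlast⟩
      · -- previous run empty: start a new run [n]
        have hnew : pvRuns (pvL non ((n + 1 : Nat) : Int))
            = pvRuns (pvL non n) ++ [[(n : Int)]] := by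
          rw [hL]
          apply pvRuns_snoc_new
          intro x hx hx1
          have hmx := List.mem_filter.mp hx
          have hxr := (PySem.List.mem_pyRange_one).mp hmx.1
          rcases hor with h0 | hcontr
          · rw [h0] at hxr
            push_cast at hxr
            omega
          · have hxeq : x = (n : Int) - 1 := by omega
            rw [hxeq] at hmx
            rw [hcontr] at hmx
            simp at hmx
        refine ⟨?_, ?_, ?_, ?_⟩
        · show st.2.2 ++ [(n : Int)] = _
          rw [hR, hnew, List.getLastD_concat]
          simp
        · show st.1 = _
          rw [hnew, List.dropLast_concat]
          exact hS
        · rw [show ((n + 1 : Nat) : Int) - 1 = (n : Int) from by push_cast; ring]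
          exact hcf
        · rw [hL, List.getLast?_concat,
            show ((n + 1 : Nat) : Int) - 1 = (n : Int) from by push_cast; ring]
      · -- extend the trailing run with n
        have hext : pvRuns (pvL non ((n + 1 : Nat) : Int))
            = (pvRuns (pvL non n)).dropLast
              ++ [((pvRuns (pvL non n)).getLastD []) ++ [(n : Int)]] := by
          rw [hL]
          exact pvRuns_snoc_extend _ _ hlast
        refine ⟨?_, ?_, ?_, ?_⟩
        · show st.2.2 ++ [(n : Int)] = _
          rw [hR, hext, List.getLastD_concat]
        · show st.1 = _
          rw [hext, List.dropLast_concat]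
          exact hS
        · rw [show ((n + 1 : Nat) : Int) - 1 = (n : Int) from by push_cast; ring]
          exact hcf
        · rw [hL, List.getLast?_concat,
            show ((n + 1 : Nat) : Int) - 1 = (n : Int) from by push_cast; ring]


-- ===== VERDICT (by name: the statement is the Claim_ definition above) =====
theorem detect_rationale_spans_spec : Claim_equal_detect_rationale_spans := by
  unfold Claim_equal_detect_rationale_spans
  intro non t m _
  unfold Spec_detect_rationale_spans
  have hrange : PySem.List.pyRange 0 t 1 = PySem.List.pyRange 0 ((t.toNat : Nat) : Int) 1 := by
    by_cases ht : 0 ≤ t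
    · rw [Int.toNat_of_nonneg ht]
    · rw [PySem.List.pyRange_one_eq_nil (by omega),
        PySem.List.pyRange_one_eq_nil (by omega)]
  have hLt : pvL non t = pvL non (t.toNat : Nat) := by unfold pvL; rw [hrange]
  have halt : detect_rationale_spans_alt non t m =
      (if ((PySem.List.pyRange 0 t 1).foldl (pvStep non m) ([], [], [])).2.2 ≠ [] ∧
          ((((PySem.List.pyRange 0 t 1).foldl (pvStep non m) ([], [], [])).2.2.length : Int) ≤ m)
       then ((PySem.List.pyRange 0 t 1).foldl (pvStep non m) ([], [], [])).1 ++
            [((PySem.List.pyRange 0 t 1).foldl (pvStep non m) ([], [], [])).2.2]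
       else ((PySem.List.pyRange 0 t 1).foldl (pvStep non m) ([], [], [])).1,
       ((PySem.List.pyRange 0 t 1).foldl (pvStep non m) ([], [], [])).2.1) := rfl
  rw [pvA_eq, halt, hrange, hLt]
  obtain ⟨hP, hD⟩ := pvInv non m t.toNat
  set st := (PySem.List.pyRange 0 ((t.toNat : Nat) : Int) 1).foldl (pvStep non m) ([], [], []) with hst
  rcases hD with ⟨hR, hS, _⟩ | ⟨hR, hS, _, hlast⟩
  · rw [if_neg (by simp [hR])]
    refine Prod.ext ?_ ?_
    · exact hS.symm
    · exact hP.symm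
  · have hLne : pvL non (t.toNat : Nat) ≠ [] := by
      intro h0
      rw [h0] at hlast
      simp at hlast
    have hrne : pvRuns (pvL non (t.toNat : Nat)) ≠ [] := by
      rw [Ne, pvRuns_eq_nil_iff]; exact hLne
    rcases List.eq_nil_or_concat (pvRuns (pvL non (t.toNat : Nat))) with h0 | ⟨G, g, hG⟩
    · exact absurd h0 hrne
    rw [List.concat_eq_append] at hG
    have hRg : st.2.2 = g := by rw [hR, hG, List.getLastD_concat]
    have hgne : g ≠ [] := by
      intro h0
      apply pvRuns_ne_nil_mem (pvL non (t.toNat : Nat))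
      rw [hG, h0]
      exact List.mem_append_right _ (by simp)
    rw [hG] at hS ⊢
    rw [List.dropLast_concat] at hS
    refine Prod.ext ?_ hP.symm
    show (G ++ [g]).filter _ = _
    rw [List.filter_append]
    by_cases hlen : ((g.length : Int) ≤ m)
    · rw [if_pos (by rw [hRg]; exact ⟨hgne, hlen⟩), hRg, hS]
      simp [hlen]
    · rw [if_neg (by rw [hRg]; exact fun hh => hlen hh.2), hS]
      simp [hlen]
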